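-- pv_equiv track=rewrite | github.com/eduardoaquinosilva/structured-and-object-oriented-programming | POO - Atividade 04_ Atributos e Métodos de Classe e Métodos Estáticos.py | visually_printable_cpf
-- ===== SOURCE A (Python) =====
-- def visually_printable_cpf(cpf):
--     cpf = list(cpf)
--     while len(cpf) < 11:
--         cpf.insert(0, '0')
--     for a in range(3, 12, 4):
--         if a < 10:
--             cpf.insert(a, '.')
--         else:
--             cpf.insert(a, '-')
--     cpf = ''.join(cpf)
--     return cpf
-- ===== SOURCE B (Python) =====
-- def visually_printable_cpf(cpf):
--     s = ''.join(cpf).rjust(11, '0')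
--     return f"{s[:3]}.{s[3:6]}.{s[6:9]}-{s[9:]}"
-- ===== Notes on version B (the rewrite author's own statement) =====
-- stated objective: idiomatic
-- what changed: Replaces the while-loop padding and the index-shifting insert loop with a single rjust left-pad and fixed-position slices joined by an f-string (no loops, no in-place insertions).
import Mathlib
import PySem

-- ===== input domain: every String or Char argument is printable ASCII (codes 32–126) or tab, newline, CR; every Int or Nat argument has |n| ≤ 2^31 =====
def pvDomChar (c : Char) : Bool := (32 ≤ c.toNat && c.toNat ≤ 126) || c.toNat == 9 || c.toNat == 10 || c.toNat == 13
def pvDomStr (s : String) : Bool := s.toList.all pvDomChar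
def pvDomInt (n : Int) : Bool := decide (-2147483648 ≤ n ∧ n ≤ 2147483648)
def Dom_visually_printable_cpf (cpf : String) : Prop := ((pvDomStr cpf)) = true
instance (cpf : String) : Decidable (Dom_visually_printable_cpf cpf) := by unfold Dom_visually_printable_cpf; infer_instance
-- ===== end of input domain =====

-- B replaces A's while-loop padding and index-shifting insert loop with one left-pad and fixed slices (idiomatic).

-- ===== PORT A =====
-- the 'while len(cpf) < 11: cpf.insert(0, '0')' loop
def pvPadLoop (cs : List Char) : List Char :=
  if cs.length < 11 then pvPadLoop ('0' :: cs) else cs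
termination_by 11 - cs.length

def visually_printable_cpf (cpf : String) : String :=
  let cs := pvPadLoop cpf.toList
  let cs := (PySem.List.pyRange 3 12 4).foldl
    (fun acc a => if a < 10 then PySem.List.insert acc a '.' else PySem.List.insert acc a '-') cs
  String.ofList cs

-- ===== PORT B =====
def visually_printable_cpf_alt (cpf : String) : String :=
  let t := cpf.toList
  -- s.rjust(11, '0'): left-pad with '0' up to length 11 (exact: rjust pads on the left, no-op when len ≥ 11)
  let s := List.replicate (11 - t.length) '0' ++ t
  String.ofList (PySem.List.slice s none (some 3) ++ '.' ::
    (PySem.List.slice s (some 3) (some 6) ++ '.' ::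
      (PySem.List.slice s (some 6) (some 9) ++ '-' :: PySem.List.slice s (some 9) none)))

-- ===== PRECONDITION & SPEC =====
def Spec_visually_printable_cpf (cpf : String) (out : String) : Prop := out = visually_printable_cpf_alt cpf
instance (cpf : String) (out : String) : Decidable (Spec_visually_printable_cpf cpf out) := by unfold Spec_visually_printable_cpf; infer_instance

-- ===== CLAIM (what is proved, stated in full; the proofs are below) =====
def Claim_equal_visually_printable_cpf : Prop := ∀ (cpf : String), Dom_visually_printable_cpf cpf → Spec_visually_printable_cpf cpf (visually_printable_cpf cpf)

-- ===== LEMMAS AND PROOFS =====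

-- A's padding loop is a left-pad with zeros
theorem pvPadLoop_eq (cs : List Char) :
    pvPadLoop cs = List.replicate (11 - cs.length) '0' ++ cs := by
  induction cs using pvPadLoop.induct with
  | case1 cs h ih =>
      rw [pvPadLoop, if_pos h, ih]
      have : 11 - cs.length = (11 - (1 + cs.length)) + 1 := by omega
      simp [this, List.replicate_succ']
      omega
  | case2 cs h =>
      rw [pvPadLoop, if_neg h]
      have : 11 - cs.length = 0 := by omega
      simp [this]

theorem pvPadLoop_len (cs : List Char) : 11 ≤ (pvPadLoop cs).length := by
  rw [pvPadLoop_eq]; simp; omega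

-- the three inserts on a list of length ≥ 11 are the slice concatenation
theorem pvInserts_eq (s : List Char) (hs : 11 ≤ s.length) :
    (PySem.List.pyRange 3 12 4).foldl
      (fun acc a => if a < 10 then PySem.List.insert acc a '.' else PySem.List.insert acc a '-') s
    = PySem.List.slice s none (some 3) ++ '.' ::
        (PySem.List.slice s (some 3) (some 6) ++ '.' ::
          (PySem.List.slice s (some 6) (some 9) ++ '-' :: PySem.List.slice s (some 9) none)) := by
  obtain ⟨a0, s, rfl⟩ : ∃ c t, s = c :: t := by cases s with | nil => simp at hs | cons c t => exact ⟨c, t, rfl⟩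
  obtain ⟨a1, s, rfl⟩ : ∃ c t, s = c :: t := by cases s with | nil => simp at hs | cons c t => exact ⟨c, t, rfl⟩
  obtain ⟨a2, s, rfl⟩ : ∃ c t, s = c :: t := by cases s with | nil => simp at hs | cons c t => exact ⟨c, t, rfl⟩
  obtain ⟨a3, s, rfl⟩ : ∃ c t, s = c :: t := by cases s with | nil => simp at hs | cons c t => exact ⟨c, t, rfl⟩
  obtain ⟨a4, s, rfl⟩ : ∃ c t, s = c :: t := by cases s with | nil => simp at hs | cons c t => exact ⟨c, t, rfl⟩
  obtain ⟨a5, s, rfl⟩ : ∃ c t, s = c :: t := by cases s with | nil => simp at hs | cons c t => exact ⟨c, t, rfl⟩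
  obtain ⟨a6, s, rfl⟩ : ∃ c t, s = c :: t := by cases s with | nil => simp at hs | cons c t => exact ⟨c, t, rfl⟩
  obtain ⟨a7, s, rfl⟩ : ∃ c t, s = c :: t := by cases s with | nil => simp at hs | cons c t => exact ⟨c, t, rfl⟩
  obtain ⟨a8, s, rfl⟩ : ∃ c t, s = c :: t := by cases s with | nil => simp at hs | cons c t => exact ⟨c, t, rfl⟩
  obtain ⟨a9, s, rfl⟩ : ∃ c t, s = c :: t := by cases s with | nil => simp at hs | cons c t => exact ⟨c, t, rfl⟩
  obtain ⟨a10, s, rfl⟩ : ∃ c t, s = c :: t := by cases s with | nil => simp at hs | cons c t => exact ⟨c, t, rfl⟩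
  have e1 : PySem.List.insert (a0::a1::a2::a3::a4::a5::a6::a7::a8::a9::a10::s) 3 '.'
      = a0::a1::a2::'.'::a3::a4::a5::a6::a7::a8::a9::a10::s := by
    rw [PySem.List.insert_ofNat _ 3 _ (by simp only [List.length_cons]; omega)]; simp
  have e2 : PySem.List.insert (a0::a1::a2::'.'::a3::a4::a5::a6::a7::a8::a9::a10::s) 7 '.'
      = a0::a1::a2::'.'::a3::a4::a5::'.'::a6::a7::a8::a9::a10::s := by
    rw [PySem.List.insert_ofNat _ 7 _ (by simp only [List.length_cons]; omega)]; simp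
  have e3 : PySem.List.insert (a0::a1::a2::'.'::a3::a4::a5::'.'::a6::a7::a8::a9::a10::s) 11 '-'
      = a0::a1::a2::'.'::a3::a4::a5::'.'::a6::a7::a8::'-'::a9::a10::s := by
    rw [PySem.List.insert_ofNat _ 11 _ (by simp only [List.length_cons]; omega)]; simp
  rw [show PySem.List.pyRange 3 12 4 = [3, 7, 11] from by decide]
  simp only [List.foldl]
  norm_num [e1, e2, e3, PySem.List.slice_to, PySem.List.slice_from, PySem.List.slice_toNat]
  rfl

-- ===== VERDICT (by name: the statement is the Claim_ definition above) =====
theorem visually_printable_cpf_spec : Claim_equal_visually_printable_cpf := by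
  intro cpf _
  unfold Spec_visually_printable_cpf visually_printable_cpf visually_printable_cpf_alt
  simp only
  rw [pvInserts_eq _ (pvPadLoop_len _), pvPadLoop_eq]
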